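-- pv_equiv track=rewrite | github.com/Mjvolk3/Swanki | swanki/generate_cards_with_complementary_audio.py | split_cards
-- ===== SOURCE A (Python) =====
-- from typing import List, Tuple
--
-- CARD_HEADER_RE = "## "
--
-- def split_cards(lines: List[str]) -> List[Tuple[str, List[str]]]:
--     """
--     Splits a markdown file into cards by H2 (## ) headings.
--     Returns list of (heading_line, body_lines).
--     """
--     cards: List[Tuple[str, List[str]]] = []
--     current_head = None
--     current_body: List[str] = []
--     for line in lines:
--         if line.startswith(CARD_HEADER_RE):
--             if current_head is not None:
--                 cards.append((current_head, current_body))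
--             current_head = line.strip()
--             current_body = []
--         else:
--             if current_head is not None:
--                 current_body.append(line)
--     if current_head is not None:
--         cards.append((current_head, current_body))
--     return cards
-- ===== SOURCE B (Python) =====
-- from typing import List, Tuple
--
-- CARD_HEADER_RE = "## "
--
-- def split_cards(lines: List[str]) -> List[Tuple[str, List[str]]]:
--     """Index-then-slice: collect H2 header indices, then slice each card out."""
--     headers = [i for i, line in enumerate(lines) if line.startswith(CARD_HEADER_RE)]
--     bounds = headers[1:] + [len(lines)]
--     return [(lines[i].strip(), lines[i + 1 : j]) for i, j in zip(headers, bounds)]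
-- ===== Notes on version B (the rewrite author's own statement) =====
-- stated objective: alternative
-- what changed: Replaced the stateful accumulator loop (current_head/current_body with a trailing flush) by an index-then-slice pass: collect all '## ' header indices, then build each card as (lines[i].strip(), lines[i+1:next_header]).
import Mathlib
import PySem

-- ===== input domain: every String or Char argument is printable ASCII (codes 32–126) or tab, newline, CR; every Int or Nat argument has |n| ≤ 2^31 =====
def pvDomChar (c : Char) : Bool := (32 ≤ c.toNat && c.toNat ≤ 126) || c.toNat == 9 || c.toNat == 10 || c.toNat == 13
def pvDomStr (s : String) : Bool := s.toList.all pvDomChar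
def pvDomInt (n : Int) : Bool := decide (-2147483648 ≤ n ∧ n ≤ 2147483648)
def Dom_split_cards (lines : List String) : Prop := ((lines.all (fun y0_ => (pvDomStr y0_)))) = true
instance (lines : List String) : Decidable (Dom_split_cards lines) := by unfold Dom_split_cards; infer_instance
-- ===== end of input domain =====

-- B replaces A's stateful accumulator loop by an index-then-slice pass (alternative decomposition, same cost).

-- ===== PORT A =====
def splitStepA (st : List (String × List String) × Option String × List String)
    (line : String) : List (String × List String) × Option String × List String :=
  if PySem.Str.startswith line "## " then
    match st.2.1 with
    | some h => (st.1 ++ [(h, st.2.2)], some (PySem.Str.strip line), [])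
    | none => (st.1, some (PySem.Str.strip line), [])
  else
    match st.2.1 with
    | some h => (st.1, some h, st.2.2 ++ [line])
    | none => st

def split_cards (lines : List String) : List (String × List String) :=
  let st := lines.foldl splitStepA ([], none, [])
  match st.2.1 with
  | some h => st.1 ++ [(h, st.2.2)]
  | none => st.1

-- ===== PORT B =====
def split_cards_alt (lines : List String) : List (String × List String) :=
  let headers := ((PySem.List.enumerate lines).filter (fun p => PySem.Str.startswith p.2 "## ")).map (·.1)
  let bounds := PySem.List.slice headers (some 1) none ++ [(lines.length : Int)]
  (headers.zip bounds).map (fun p =>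
    (PySem.Str.strip (PySem.List.pyGetD lines p.1 ""),
     PySem.List.slice lines (some (p.1 + 1)) (some p.2)))

-- ===== PRECONDITION & SPEC =====
def Spec_split_cards (lines : List String) (out : List (String × List String)) : Prop := out = split_cards_alt lines
instance (lines : List String) (out : List (String × List String)) : Decidable (Spec_split_cards lines out) := by unfold Spec_split_cards; infer_instance

-- ===== CLAIM (what is proved, stated in full; the proofs are below) =====
def Claim_equal_split_cards : Prop := ∀ (lines : List String), Dom_split_cards lines → Spec_split_cards lines (split_cards lines)

-- ===== LEMMAS AND PROOFS =====

def isH (l : String) : Bool := PySem.Str.startswith l "## "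

-- recursive "span" middle form both ports are reduced to
def goB : List String → List (String × List String)
  | [] => []
  | l :: rest =>
      (PySem.Str.strip l, rest.takeWhile (fun x => !isH x)) ::
        goB (rest.dropWhile (fun x => !isH x))
termination_by xs => xs.length
decreasing_by exact Nat.lt_succ_of_le (List.length_dropWhile_le _ _)

def finishA (st : List (String × List String) × Option String × List String) :
    List (String × List String) :=
  match st.2.1 with
  | some h => st.1 ++ [(h, st.2.2)]
  | none => st.1

-- Nat-indexed header positions
def natHdr : List String → List Nat
  | [] => []
  | l :: rest => if isH l then 0 :: (natHdr rest).map (· + 1) else (natHdr rest).map (· + 1)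

def cardAt (lines : List String) (p : Nat × Nat) : String × List String :=
  (PySem.Str.strip (lines.getD p.1 ""), (lines.drop (p.1 + 1)).take (p.2 - p.1 - 1))

def natCore (lines : List String) : List (String × List String) :=
  ((natHdr lines).zip ((natHdr lines).drop 1 ++ [lines.length])).map (cardAt lines)

lemma A_some (ls : List String) (cards : List (String × List String)) (h : String)
    (body : List String) :
    finishA (ls.foldl splitStepA (cards, some h, body)) =
      cards ++ (h, body ++ ls.takeWhile (fun x => !isH x)) ::
        goB (ls.dropWhile (fun x => !isH x)) := by
  induction ls generalizing cards h body with
  | nil => simp [finishA, goB]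
  | cons l rest ih =>
    by_cases hl : isH l
    · rw [List.foldl_cons]
      have hstep : splitStepA (cards, some h, body) l =
          (cards ++ [(h, body)], some (PySem.Str.strip l), []) := by
        simp [splitStepA, isH] at hl ⊢; simp [hl]
      rw [hstep, ih]
      rw [List.takeWhile_cons, List.dropWhile_cons]
      simp [hl, goB]
    · rw [List.foldl_cons]
      have hstep : splitStepA (cards, some h, body) l =
          (cards, some h, body ++ [l]) := by
        simp [splitStepA, isH] at hl ⊢; simp [hl]
      rw [hstep, ih]
      rw [List.takeWhile_cons, List.dropWhile_cons]
      simp [hl]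

lemma A_none (ls : List String) (cards : List (String × List String)) :
    finishA (ls.foldl splitStepA (cards, none, ([] : List String))) =
      cards ++ goB (ls.dropWhile (fun x => !isH x)) := by
  induction ls generalizing cards with
  | nil => simp [finishA, goB]
  | cons l rest ih =>
    by_cases hl : isH l
    · rw [List.foldl_cons]
      have hstep : splitStepA (cards, none, []) l =
          (cards, some (PySem.Str.strip l), []) := by
        simp [splitStepA, isH] at hl ⊢; simp [hl]
      rw [hstep, A_some, List.dropWhile_cons]
      simp [hl, goB]
    · rw [List.foldl_cons]
      have hstep : splitStepA (cards, none, ([] : List String)) l =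
          (cards, none, []) := by
        simp [splitStepA, isH] at hl ⊢; simp [hl]
      rw [hstep, ih, List.dropWhile_cons]
      simp [hl]

lemma hIdx_eq (ls : List String) (s : Int) :
    ((PySem.List.enumerate ls s).filter (fun p => isH p.2)).map (·.1) =
      (natHdr ls).map (fun n : Nat => s + (n : Int)) := by
  induction ls generalizing s with
  | nil => simp [natHdr, PySem.List.enumerate]
  | cons l rest ih =>
    rw [PySem.List.enumerate_cons]
    simp only [List.filter_cons, natHdr]
    by_cases hl : isH l
    · simp only [hl, if_true, List.map_cons, ih (s + 1), List.map_map]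
      refine List.cons_eq_cons.mpr ⟨by simp, ?_⟩
      apply List.map_congr_left; intro n _; simp only [Function.comp_apply]; push_cast; ring
    · simp only [hl, if_false, Bool.false_eq_true, ih (s + 1), List.map_map]
      apply List.map_congr_left; intro n _; simp only [Function.comp_apply]; push_cast; ring

lemma B_eq_natCore (lines : List String) : split_cards_alt lines = natCore lines := by
  unfold split_cards_alt natCore
  have h := hIdx_eq lines 0
  simp only [isH, zero_add] at h
  have h2 : ((natHdr lines).map (fun n : Nat => (n : Int))).tail ++ [(lines.length : Int)] =
      ((natHdr lines).drop 1 ++ [lines.length]).map (fun n : Nat => (n : Int)) := by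
    simp [← List.drop_one]
  simp only [h, PySem.List.slice_from_one, h2, List.zip_map, List.map_map]
  apply List.map_congr_left
  rintro ⟨i, j⟩ _
  simp only [Function.comp_apply, Prod.map_apply, cardAt]
  have hi : ((i : Int) + 1) = ((i + 1 : Nat) : Int) := by push_cast; ring
  rw [hi, PySem.List.slice_natCast]
  simp [Nat.sub_sub]

lemma takeWhile_eq_take_natHdr (xs : List String) :
    xs.takeWhile (fun x => !isH x) = xs.take ((natHdr xs).headD xs.length) := by
  induction xs with
  | nil => simp
  | cons x xs ih =>
    by_cases hx : isH x
    · simp [natHdr, hx]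
    · simp only [natHdr, List.takeWhile_cons, hx, Bool.not_false, if_true]
      rw [ih]
      cases hnh : natHdr xs with
      | nil => simp
      | cons i t => simp

lemma zip_shift_card (l : String) (rest : List String) :
    ((((natHdr rest).map (· + 1)).zip
        (((natHdr rest).map (· + 1)).drop 1 ++ [rest.length + 1])).map (cardAt (l :: rest))) =
      natCore rest := by
  unfold natCore
  have hdrop : (((natHdr rest).map (· + 1)).drop 1) = ((natHdr rest).drop 1).map (· + 1) := by
    exact Eq.symm List.map_drop
  have happ : ((natHdr rest).drop 1).map (· + 1) ++ [rest.length + 1] =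
      ((natHdr rest).drop 1 ++ [rest.length]).map (· + 1) := by simp
  rw [hdrop, happ, List.zip_map, List.map_map]
  apply List.map_congr_left
  rintro ⟨i, j⟩ _
  simp only [Function.comp_apply, Prod.map_apply, cardAt, List.getD_cons_succ, List.drop_succ_cons]
  have harg : j + 1 - (i + 1) - 1 = j - i - 1 := by omega
  rw [harg]

lemma zip_head_cons (a : Nat) (t : List Nat) (z : Nat) :
    (a :: t).zip (t ++ [z]) = (a, t.headD z) :: t.zip (t.drop 1 ++ [z]) := by
  cases t <;> simp

lemma natCore_eq_goB (ls : List String) :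
    natCore ls = goB (ls.dropWhile (fun x => !isH x)) := by
  induction ls with
  | nil => simp [natCore, natHdr, goB]
  | cons l rest ih =>
    by_cases hl : isH l
    · rw [List.dropWhile_cons]
      simp only [hl, Bool.not_true, if_false, Bool.false_eq_true]
      rw [goB]
      unfold natCore
      simp only [natHdr, if_pos hl, List.length_cons]
      rw [List.drop_one, List.tail_cons,
        show ((natHdr rest).map (· + 1) ++ [rest.length + 1]) =
          ((natHdr rest).map (· + 1)) ++ [rest.length + 1] from rfl]
      rw [zip_head_cons 0 ((natHdr rest).map (· + 1)) (rest.length + 1)]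
      rw [List.map_cons, zip_shift_card l rest, ih]
      congr 1
      have hhd : (((natHdr rest).map (· + 1)).headD (rest.length + 1)) =
          ((natHdr rest).headD rest.length) + 1 := by
        cases natHdr rest <;> simp
      simp only [cardAt, hhd, List.getD_cons_zero, List.drop_succ_cons, List.drop_zero]
      rw [takeWhile_eq_take_natHdr]
      have harg : (natHdr rest).headD rest.length + 1 - 0 - 1 = (natHdr rest).headD rest.length := by
        omega
      rw [harg]
    · rw [List.dropWhile_cons]
      simp only [hl, Bool.not_false, if_true]
      rw [← ih, ← zip_shift_card l rest]
      simp only [natCore, natHdr, if_neg hl, List.length_cons]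

-- ===== VERDICT (by name: the statement is the Claim_ definition above) =====
theorem split_cards_spec : Claim_equal_split_cards := by
  intro lines _
  unfold Spec_split_cards
  rw [B_eq_natCore, natCore_eq_goB]
  have := A_none lines []
  simpa [split_cards, finishA] using this
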